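-- pv_equiv track=rewrite | github.com/lkundrak/i89 | i89.py | __byte_parse
-- ===== SOURCE A (Python) =====
-- def __byte_parse(bs, second_flag):
--     b = 0
--     m = 0
--     f = { }
--     for i in range(8):
--         c = bs[7-i]
--         if c == '0':
--             m |= (1 << i)
--         elif c == '1':
--             b |= (1 << i)
--             m |= (1 << i)
--         else:
--             if second_flag:
--                 c += '2'
--             if c not in f:
--                 f[c] = 0
--             f[c] |= (1 << i)
--     return b, m, f
-- ===== SOURCE B (Python) =====
-- def __byte_parse(bs, second_flag):
--     window = [bs[i] for i in range(8)]
--     # base/mask words by left-to-right Horner accumulation (MSB first)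
--     b = 0
--     m = 0
--     for c in window:
--         b = 2 * b + (1 if c == '1' else 0)
--         m = 2 * m + (1 if c == '0' or c == '1' else 0)
--     # flags: group the bit positions per key first, then aggregate each group
--     groups = {}
--     for i, c in enumerate(window[::-1]):
--         if c != '0' and c != '1':
--             key = c + '2' if second_flag else c
--             groups.setdefault(key, []).append(i)
--     f = {k: sum(1 << i for i in ps) for k, ps in groups.items()}
--     return b, m, f
-- ===== Notes on version B (the rewrite author's own statement) =====
-- stated objective: alternative
-- what changed: A's single right-to-left pass that ORs 1<<i into three pieces of state is replaced by a left-to-right Horner accumulation (b = 2*b + bit) over the 8-char window for the two words, and a group-by pass that first collects the bit positions per flag key and only then aggregates each group into its mask.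
import Mathlib
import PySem

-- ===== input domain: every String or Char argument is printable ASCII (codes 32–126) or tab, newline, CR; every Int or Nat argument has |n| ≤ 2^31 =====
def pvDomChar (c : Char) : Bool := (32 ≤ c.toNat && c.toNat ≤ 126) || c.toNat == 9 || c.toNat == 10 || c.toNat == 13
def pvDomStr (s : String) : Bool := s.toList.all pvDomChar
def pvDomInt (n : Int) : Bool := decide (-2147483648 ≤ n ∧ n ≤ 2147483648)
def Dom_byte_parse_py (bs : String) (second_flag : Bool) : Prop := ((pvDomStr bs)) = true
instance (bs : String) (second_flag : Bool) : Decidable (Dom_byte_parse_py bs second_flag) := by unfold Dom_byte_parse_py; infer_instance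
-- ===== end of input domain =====

-- B replaces A's single right-to-left pass of per-bit ORs by a left-to-right Horner
-- accumulation for the two words and a group-positions-then-aggregate pass for the
-- flag dictionary (objective: alternative).

-- ===== PORT A =====
-- the loop body of A: one step for position i, updating (b, m, f) together
def aStep (bs : String) (second_flag : Bool)
    (st : Int × Int × PySem.Dict String Int) (i : Int) : Int × Int × PySem.Dict String Int :=
  match PySem.Str.pyGet? bs (7 - i) with
  | none => st            -- bs[7-i] raises IndexError in Python; excluded by Pre_
  | some ch =>
    if ch = '0' then (st.1, PySem.Int.bor st.2.1 ((1:Int) <<< i.toNat), st.2.2)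
    else if ch = '1' then (PySem.Int.bor st.1 ((1:Int) <<< i.toNat), PySem.Int.bor st.2.1 ((1:Int) <<< i.toNat), st.2.2)
    else
      let c := if second_flag then String.singleton ch ++ "2" else String.singleton ch
      let f := if st.2.2.contains c then st.2.2 else st.2.2.insert c 0
      (st.1, st.2.1, f.modify c 0 (fun v => PySem.Int.bor v ((1:Int) <<< i.toNat)))

def byte_parse_py (bs : String) (second_flag : Bool) : Int × Int × (List (String × Int)) :=
  let r := (PySem.List.pyRange 0 8 1).foldl (aStep bs second_flag) (0, 0, PySem.Dict.empty)
  (r.1, r.2.1, r.2.2.items)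

-- ===== PORT B =====
-- the body of B's grouping loop: groups.setdefault(key, []).append(i) for non-'0'/'1' chars
def bGroupStep (second_flag : Bool)
    (g : PySem.Dict String (List Int)) (ic : Int × Char) : PySem.Dict String (List Int) :=
  if ic.2 ≠ '0' ∧ ic.2 ≠ '1' then
    let key := if second_flag then String.singleton ic.2 ++ "2" else String.singleton ic.2
    (g.setdefault key []).modify key [] (fun ps => ps ++ [ic.1])
  else g

-- sum(1 << i for i in ps)
def sumBits (ps : List Int) : Int := (ps.map (fun i => (1:Int) <<< i.toNat)).sum

def byte_parse_py_alt (bs : String) (second_flag : Bool) : Int × Int × (List (String × Int)) :=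
  -- [bs[i] for i in range(8)]; the default is never read under Pre_ (Python raises IndexError there)
  let window := (PySem.List.pyRange 0 8 1).map (fun i => PySem.List.pyGetD bs.toList i ' ')
  -- Horner accumulation, one left-to-right pass over the window
  let bm := window.foldl (fun (p : Int × Int) c =>
      (2 * p.1 + (if c = '1' then 1 else 0),
       2 * p.2 + (if c = '0' ∨ c = '1' then 1 else 0))) ((0:Int), (0:Int))
  -- group the bit positions per key (window[::-1] is reverse: PySem.List.slice?_none_none_neg_one)
  let groups := (PySem.List.enumerate window.reverse 0).foldl (bGroupStep second_flag) PySem.Dict.empty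
  -- then aggregate each group: {k: sum(1 << i for i in ps) ...}
  let f := groups.items.foldl (fun (d : PySem.Dict String Int) p => d.insert p.1 (sumBits p.2)) PySem.Dict.empty
  (bm.1, bm.2, f.items)

-- ===== PRECONDITION & SPEC =====
-- Python A evaluates bs[7], …, bs[0]; it raises IndexError iff len(bs) < 8.
def Pre_byte_parse_py (bs : String) (second_flag : Bool) : Prop := 8 ≤ bs.toList.length
instance (bs : String) (second_flag : Bool) : Decidable (Pre_byte_parse_py bs second_flag) := by unfold Pre_byte_parse_py; infer_instance
def pvWitness_byte_parse_py : String × Bool := ("01a01b0c", true)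

def Spec_byte_parse_py (bs : String) (second_flag : Bool) (out : Int × Int × (List (String × Int))) : Prop := out = byte_parse_py_alt bs second_flag
instance (bs : String) (second_flag : Bool) (out : Int × Int × (List (String × Int))) : Decidable (Spec_byte_parse_py bs second_flag out) := by unfold Spec_byte_parse_py; infer_instance

-- ===== CLAIM (what is proved, stated in full; the proofs are below) =====
def Claim_equal_byte_parse_py : Prop := ∀ (bs : String) (second_flag : Bool), Dom_byte_parse_py bs second_flag → Pre_byte_parse_py bs second_flag → Spec_byte_parse_py bs second_flag (byte_parse_py bs second_flag)

-- ===== LEMMAS AND PROOFS =====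

-- OR-ing in a bit above the accumulated value is addition
theorem lor_two_pow_eq_add (n : Nat) : ∀ a : Nat, a < 2^n → a ||| 2^n = a + 2^n := by
  induction n with
  | zero => intro a h; interval_cases a; decide
  | succ n ih =>
    intro a h
    have hd : a / 2 < 2^n := by
      rw [Nat.div_lt_iff_lt_mul (by norm_num)]
      calc a < 2^(n+1) := h
        _ = 2^n * 2 := by ring
    have key := ih (a / 2) hd
    have hb : Nat.bit (a.testBit 0) (a >>> 1) = a := Nat.bit_testBit_zero_shiftRight_one a
    have h2 : Nat.bit false (2^n) = 2^(n+1) := by rw [Nat.bit_false_apply]; ring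
    have hlor := Nat.lor_bit (a.testBit 0) (a >>> 1) false (2^n)
    rw [hb, h2] at hlor
    simp only [Bool.or_false] at hlor
    rw [hlor, Nat.bit_val, Nat.shiftRight_one]
    have hm : a % 2 = (a.testBit 0).toNat := by
      cases hb0 : a.testBit 0 <;> simp [Nat.testBit_zero] at hb0 <;> simp [hb0]
    have hdm := Nat.div_add_mod a 2
    have hp : 2^(n+1) = 2 * 2^n := by ring
    rw [key, ← hm]; omega

theorem int_bor_two_pow (n : Nat) (a : Int) (h0 : 0 ≤ a) (h : a < 2^n) :
    PySem.Int.bor a ((2:Int)^n) = a + 2^n := by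
  obtain ⟨m, rfl⟩ := Int.eq_ofNat_of_zero_le h0
  have hm : m < 2^n := by exact_mod_cast h
  have h1 : ((2:Int)^n) = ((2^n : Nat) : Int) := by push_cast; ring
  rw [h1, PySem.Int.bor_natCast, lor_two_pow_eq_add n m hm]
  push_cast; ring

-- 1 << i at position i = n, as an integer power of two
theorem shl_toNat (n : Nat) : ((1:Int) <<< ((n:Int)).toNat) = (2:Int)^n := by
  rw [Int.toNat_natCast, Int.shiftLeft_eq]; ring

theorem shl_toNat' (n : Nat) : ((1:Int) <<< (((n:Int)).toNat : Int)) = (2:Int)^n := by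
  rw [Int.toNat_natCast, Int.one_shiftLeft]
  push_cast; ring

-- appending one element to an enumerated list
theorem enum_app {α : Type} (x : α) : ∀ (l : List α) (s : Int),
    PySem.List.enumerate (l ++ [x]) s = PySem.List.enumerate l s ++ [(s + l.length, x)] := by
  intro l
  induction l with
  | nil => intro s; simp [PySem.List.enumerate]
  | cons a t ih => intro s; simp [PySem.List.enumerate, ih (s+1)]; omega

-- A's else-branch dict update equals a plain insert of the updated lookup
theorem dict_step_eq (f : PySem.Dict String Int) (c : String) (g : Int → Int) :
    (if f.contains c then f else f.insert c 0).modify c 0 g = f.insert c (g (f.getD c 0)) := by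
  by_cases hc : f.contains c
  · simp [hc]; rfl
  · have hgd : f.getD c 0 = 0 := PySem.Dict.getD_of_not_contains _ _ (by simpa using hc)
    rw [if_neg hc, hgd,
        show (f.insert c 0).modify c 0 g
          = (f.insert c 0).insert c (g ((f.insert c 0).getD c 0)) from rfl,
        PySem.Dict.getD_insert_self, PySem.Dict.insert_insert_self]

-- B's setdefault-then-update equals a plain insert of the updated lookup
theorem setdefault_step_eq (d : PySem.Dict String (List Int)) (k : String) (g : List Int → List Int) :
    (d.setdefault k []).modify k [] g = d.insert k (g (d.getD k [])) := by
  by_cases hc : d.contains k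
  · rw [PySem.Dict.setdefault_of_contains _ _ hc]; rfl
  · have hgd : d.getD k [] = [] :=
      PySem.Dict.getD_of_not_contains _ _ (by simpa using hc)
    rw [PySem.Dict.setdefault_of_not_contains _ _ (by simpa using hc), hgd,
        show (d.insert k []).modify k [] g
          = (d.insert k []).insert k (g ((d.insert k []).getD k [])) from rfl,
        PySem.Dict.getD_insert_self, PySem.Dict.insert_insert_self]

-- the value of a bit string read LSB-first
def val (bit : Char → Int) : List Char → Int
  | [] => 0
  | c :: l => bit c + 2 * val bit l

def bit1 (c : Char) : Int := if c = '1' then 1 else 0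
def bit01 (c : Char) : Int := if c = '0' ∨ c = '1' then 1 else 0

theorem val_append (bit : Char → Int) (c : Char) :
    ∀ l : List Char, val bit (l ++ [c]) = val bit l + bit c * 2^l.length := by
  intro l
  induction l with
  | nil => simp [val]
  | cons a t ih => simp [val, ih]; ring

-- left-to-right Horner accumulation computes the LSB-first value of the reverse
theorem horner_eq_val (bit : Char → Int) :
    ∀ (l : List Char) (a0 : Int),
      l.foldl (fun a c => 2*a + bit c) a0 = a0 * 2^l.length + val bit l.reverse := by
  intro l
  induction l with
  | nil => intro a0; simp [val]
  | cons a t ih =>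
    intro a0
    simp only [List.foldl_cons, List.reverse_cons, ih, val_append, List.length_cons,
      List.length_reverse]
    ring

-- under Pre_, the indexed comprehension [bs[i] for i in range(8)] is the 8-char prefix
theorem window_take (xs : List Char) (h : 8 ≤ xs.length) :
    (PySem.List.pyRange 0 8 1).map (fun i => PySem.List.pyGetD xs i ' ') = xs.take 8 := by
  apply List.ext_getElem
  · simp [PySem.List.length_pyRange_one]
    omega
  · intro k hk1 hk2
    simp only [List.getElem_map, PySem.List.getElem_pyRange_one, List.getElem_take]
    have hk : k < 8 := by simpa [PySem.List.length_pyRange_one] using hk1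
    have h0 : (0:Int) + (k:Int) = ((k:Nat):Int) := by omega
    rw [h0, PySem.List.pyGetD_natCast]
    exact List.getD_eq_getElem _ _ (by omega)

-- apply a function to every value of a dict, keeping keys and order
def mapVal (φ : List Int → Int) (d : PySem.Dict String (List Int)) : PySem.Dict String Int :=
  PySem.Dict.mk (d.items.map (fun p => (p.1, φ p.2)))

theorem contains_mapVal (φ : List Int → Int) (d : PySem.Dict String (List Int)) (k : String) :
    (mapVal φ d).contains k = d.contains k := by
  simp only [mapVal, PySem.Dict.contains, List.any_map]; rfl

theorem get?_mapVal (φ : List Int → Int) (d : PySem.Dict String (List Int)) (k : String) :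
    (mapVal φ d).get? k = (d.get? k).map φ := by
  simp only [mapVal, PySem.Dict.get?, List.find?_map]
  rw [show ((fun p : String × Int => p.1 == k) ∘ (fun p : String × List Int => (p.1, φ p.2)))
      = (fun p : String × List Int => p.1 == k) from rfl]
  cases List.find? (fun p : String × List Int => p.1 == k) d.items <;> simp

theorem getD_mapVal (φ : List Int → Int) (d : PySem.Dict String (List Int)) (k : String)
    (h0 : φ [] = 0) : (mapVal φ d).getD k 0 = φ (d.getD k []) := by
  simp only [PySem.Dict.getD, get?_mapVal]
  cases d.get? k <;> simp [h0]

theorem mapVal_insert (φ : List Int → Int) (d : PySem.Dict String (List Int))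
    (k : String) (v : List Int) :
    mapVal φ (d.insert k v) = (mapVal φ d).insert k (φ v) := by
  apply PySem.Dict.ext
  by_cases hc : d.contains k
  · rw [show (mapVal φ (d.insert k v)).items = (d.insert k v).items.map (fun p => (p.1, φ p.2)) from rfl,
        PySem.Dict.items_insert_of_contains _ _ hc,
        PySem.Dict.items_insert_of_contains _ _ (by rw [contains_mapVal]; exact hc),
        show (mapVal φ d).items = d.items.map (fun p => (p.1, φ p.2)) from rfl,
        List.map_map, List.map_map]
    apply List.map_congr_left
    intro p _
    by_cases hp : p.1 = k <;> simp [Function.comp, hp]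
  · rw [show (mapVal φ (d.insert k v)).items = (d.insert k v).items.map (fun p => (p.1, φ p.2)) from rfl,
        PySem.Dict.items_insert_of_not_contains _ _ (by simpa using hc),
        PySem.Dict.items_insert_of_not_contains _ _ (by rw [contains_mapVal]; simpa using hc),
        show (mapVal φ d).items = d.items.map (fun p => (p.1, φ p.2)) from rfl,
        List.map_append]
    simp

-- the invariant tying A's combined pass to B's ingredients, position by position
theorem inv (bs : String) (second_flag : Bool) (rev : List Char)
    (hlen : rev.length = 8)
    (hget : ∀ i : Nat, i < 8 → ∀ h : i < rev.length,
      PySem.Str.pyGet? bs (7 - (i:Int)) = some rev[i]) :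
    ∀ n : Nat, n ≤ 8 →
    ((PySem.List.pyRange 0 (n:Int) 1).foldl (aStep bs second_flag) (0, 0, PySem.Dict.empty)
      = (val bit1 (rev.take n), val bit01 (rev.take n),
         mapVal sumBits ((PySem.List.enumerate (rev.take n) 0).foldl (bGroupStep second_flag) PySem.Dict.empty)))
    ∧ 0 ≤ val bit1 (rev.take n) ∧ val bit1 (rev.take n) < 2^n
    ∧ 0 ≤ val bit01 (rev.take n) ∧ val bit01 (rev.take n) < 2^n
    ∧ ((PySem.List.enumerate (rev.take n) 0).foldl (bGroupStep second_flag) PySem.Dict.empty).keys.Nodup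
    ∧ ∀ k, 0 ≤ sumBits (((PySem.List.enumerate (rev.take n) 0).foldl (bGroupStep second_flag) PySem.Dict.empty).getD k [])
        ∧ sumBits (((PySem.List.enumerate (rev.take n) 0).foldl (bGroupStep second_flag) PySem.Dict.empty).getD k []) < 2^n := by
  intro n
  induction n with
  | zero =>
    intro _
    refine ⟨rfl, by simp [val], by simp [val], by simp [val], by simp [val],
      PySem.Dict.nodup_keys_empty, ?_⟩
    intro k
    simp [PySem.Dict.getD_empty, sumBits]
  | succ n ih =>
    intro hn8
    have hn : n ≤ 8 := by omega
    obtain ⟨heq, hb0, hb1, hm0, hm1, hnd, hbnd⟩ := ih hn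
    have hnlt : n < rev.length := by omega
    have htake : rev.take (n+1) = rev.take n ++ [rev[n]] := by
      rw [List.take_add_one, List.getElem?_eq_getElem hnlt]; rfl
    have hlt : (rev.take n).length = n := by simp [List.length_take]; omega
    have henum : PySem.List.enumerate (rev.take (n+1)) 0
        = PySem.List.enumerate (rev.take n) 0 ++ [((n:Int), rev[n])] := by
      rw [htake, enum_app, hlt]; norm_num
    have hrange : PySem.List.pyRange 0 ((n+1:Nat):Int) 1
        = PySem.List.pyRange 0 (n:Int) 1 ++ [(n:Int)] := by
      push_cast
      exact PySem.List.pyRange_one_succ_right (by positivity)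
    have hvb := val_append bit1 rev[n] (rev.take n)
    have hvm := val_append bit01 rev[n] (rev.take n)
    rw [hlt] at hvb hvm
    have hgetn := hget n (by omega) hnlt
    have h2p : (0:Int) < 2^n := by positivity
    have hp1 : (2:Int)^(n+1) = 2 * 2^n := by ring
    have hshl : ((1:Int) <<< ((n:Int)).toNat) = (2:Int)^n := shl_toNat n
    rw [hrange, henum, htake, List.foldl_append, List.foldl_append, heq, hvb, hvm]
    set g := (PySem.List.enumerate (rev.take n) 0).foldl (bGroupStep second_flag) PySem.Dict.empty with hg
    simp only [List.foldl_cons, List.foldl_nil]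
    by_cases h0 : rev[n] = '0'
    · simp only [aStep, bGroupStep, hgetn, h0,
        if_neg (show ¬(('0':Char) ≠ '0' ∧ ('0':Char) ≠ '1') by decide)]
      have hb1' : bit1 '0' = 0 := by decide
      have hm1' : bit01 '0' = 1 := by decide
      refine ⟨?_, by simp [hb1']; linarith, by simp [hb1']; linarith,
        by simp [hm1']; linarith, by simp [hm1']; linarith, by simpa using hnd, ?_⟩
      · simp only [hb1', hm1', hshl]
        rw [int_bor_two_pow n _ hm0 hm1]
        norm_num
      · intro k
        have := hbnd k
        exact ⟨this.1, by linarith [this.2]⟩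
    · by_cases h1 : rev[n] = '1'
      · simp only [aStep, bGroupStep, hgetn, h1, if_neg (show ¬(('1':Char) = '0') by decide),
          if_neg (show ¬(('1':Char) ≠ '0' ∧ ('1':Char) ≠ '1') by decide), if_true]
        have hb1' : bit1 '1' = 1 := by decide
        have hm1' : bit01 '1' = 1 := by decide
        refine ⟨?_, by simp [hb1']; linarith, by simp [hb1']; linarith,
          by simp [hm1']; linarith, by simp [hm1']; linarith, by simpa using hnd, ?_⟩
        · simp only [hb1', hm1', hshl]
          rw [int_bor_two_pow n _ hb0 hb1, int_bor_two_pow n _ hm0 hm1]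
          norm_num
        · intro k
          have := hbnd k
          exact ⟨this.1, by linarith [this.2]⟩
      · -- flag character
        have hb1' : bit1 rev[n] = 0 := by simp [bit1, h1]
        have hm1' : bit01 rev[n] = 0 := by simp [bit01, h0, h1]
        simp only [aStep, bGroupStep, hgetn, if_neg h0, if_neg h1,
          if_pos (show ((n:Int), rev[n]).2 ≠ '0' ∧ ((n:Int), rev[n]).2 ≠ '1' from And.intro h0 h1)]
        set key := if second_flag then String.singleton rev[n] ++ "2" else String.singleton rev[n] with hkey
        rw [setdefault_step_eq, mapVal_insert, dict_step_eq,
            getD_mapVal sumBits g key rfl]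
        have hps := hbnd key
        have hsum : sumBits (g.getD key [] ++ [(n:Int)]) = sumBits (g.getD key []) + 2^n := by
          simp only [sumBits, List.map_append, List.map_cons, List.map_nil,
            List.sum_append, List.sum_cons, List.sum_nil, shl_toNat' n]
          ring
        refine ⟨?_, by simp [hb1']; linarith, by simp [hb1']; linarith,
          by simp [hm1']; linarith, by simp [hm1']; linarith,
          PySem.Dict.nodup_keys_insert _ _ _ hnd, ?_⟩
        · rw [hshl, int_bor_two_pow n _ hps.1 hps.2, hsum]
          simp [hb1', hm1']
        · intro k
          rw [PySem.Dict.getD_insert]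
          by_cases hk : k = key
          · rw [if_pos hk, hsum]
            exact ⟨by linarith [hps.1], by linarith [hps.2]⟩
          · rw [if_neg hk]
            have := hbnd k
            exact ⟨this.1, by linarith [this.2]⟩

-- ===== VERDICT (by name: the statement is the Claim_ definition above) =====
theorem byte_parse_py_spec : Claim_equal_byte_parse_py := by
  intro bs second_flag _ hpre
  unfold Pre_byte_parse_py at hpre
  unfold Spec_byte_parse_py byte_parse_py byte_parse_py_alt
  have hwin : (PySem.List.pyRange 0 8 1).map (fun i => PySem.List.pyGetD bs.toList i ' ')
      = bs.toList.take 8 := window_take bs.toList hpre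
  rw [hwin]
  set w := bs.toList.take 8 with hw
  set rev := w.reverse with hrev
  have hwlen : w.length = 8 := by
    simp only [hw, List.length_take]; omega
  have hlen : rev.length = 8 := by simp [hrev, hwlen]
  have hget : ∀ i : Nat, i < 8 → ∀ h : i < rev.length,
      PySem.Str.pyGet? bs (7 - (i:Int)) = some rev[i] := by
    intro i hi h
    have h7 : (7:Int) - (i:Int) = ((7 - i : Nat) : Int) := by omega
    have h7l : 7 - i < bs.toList.length := by omega
    have hL : PySem.Str.pyGet? bs (7 - (i:Int)) = bs.toList[7 - i]? := by
      simp only [PySem.Str.pyGet?_eq, PySem.Chars.pyGet?_eq_listPyGet?, h7,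
        PySem.List.pyGet?_natCast]
    have hR : rev[i]? = bs.toList[7 - i]? := by
      have hh : i < w.length := by omega
      rw [hrev, List.getElem?_reverse hh, hwlen, hw, List.getElem?_take_of_lt (by omega)]
    rw [hL, ← hR]
    exact List.getElem?_eq_getElem h
  obtain ⟨heq, -, -, -, -, hnd, -⟩ := inv bs second_flag rev hlen hget 8 (le_refl 8)
  have htr : rev.take 8 = rev := List.take_of_length_le (by omega)
  rw [htr] at heq hnd
  have h8 : ((8:Nat):Int) = (8:Int) := by norm_num
  rw [h8] at heq
  rw [heq]
  dsimp only
  -- B's Horner pass is two independent folds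
  rw [PySem.List.foldl_prod_mk
      (f := fun (a : Int) (c : Char) => 2 * a + (if c = '1' then (1:Int) else 0))
      (g := fun (a : Int) (c : Char) => 2 * a + (if c = '0' ∨ c = '1' then (1:Int) else 0))]
  have hfb : (fun (a : Int) (c : Char) => 2 * a + (if c = '1' then (1:Int) else 0))
      = fun (a : Int) (c : Char) => 2 * a + bit1 c := rfl
  have hfm : (fun (a : Int) (c : Char) => 2 * a + (if c = '0' ∨ c = '1' then (1:Int) else 0))
      = fun (a : Int) (c : Char) => 2 * a + bit01 c := rfl
  rw [hfb, hfm, horner_eq_val bit1 w 0, horner_eq_val bit01 w 0]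
  -- B's aggregation pass over the grouped items
  set G := (PySem.List.enumerate rev 0).foldl (bGroupStep second_flag) PySem.Dict.empty with hG
  have hnd' : (G.items.map (fun p => p.1)).Nodup := hnd
  have hfresh : ∀ p ∈ G.items, (PySem.Dict.empty : PySem.Dict String Int).contains p.1 = false := by
    intro p _
    simp [PySem.Dict.contains_empty]
  rw [PySem.Dict.items_foldl_insert_fresh G.items (fun p => p.1) (fun p => sumBits p.2)
      PySem.Dict.empty hfresh hnd']
  simp [mapVal]
  exact ⟨rfl, rfl, rfl⟩
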